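-- pv_equiv track=rewrite | github.com/yonatanbitton/mdtel | src/high_recall_matcher_sentence_level.py | prepare_msg_ngrams
-- ===== SOURCE A (Python) =====
-- NUMBER_OF_GRAMS = 3
--
-- def prepare_msg_ngrams(msg_txt):
--     msg_txt = msg_txt.replace(".", " ")
--     msg_words = msg_txt.split(" ")
--     msg_words = [w for w in msg_words if w != "" and w != " " and len(w) >= 2]
--     if len(msg_words) < 3:
--         msg_words.append("PAD")
--     ngrams = list(zip(*[msg_words[i:] for i in range(NUMBER_OF_GRAMS)]))
--     if len(ngrams) > 0:
--         last_gram = ngrams[-1]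
--         extra_gram = last_gram[1], last_gram[2], 'PAD'
--         ngrams.append(extra_gram)
--         extra_gram_2 = last_gram[2], 'PAD', 'PAD'
--         ngrams.append(extra_gram_2)
--     return ngrams
-- ===== SOURCE B (Python) =====
-- def prepare_msg_ngrams(msg_txt):
--     words = [w for w in msg_txt.replace(".", " ").split(" ") if len(w) >= 2]
--     if len(words) < 3:
--         words.append("PAD")
--     if len(words) < 3:
--         return []
--     return _suffix_grams(words)
--
--
-- def _suffix_grams(ws):
--     # one trigram per non-empty suffix: missing positions default to 'PAD'
--     if not ws:
--         return []
--     b = ws[1] if len(ws) > 1 else "PAD"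
--     c = ws[2] if len(ws) > 2 else "PAD"
--     return [(ws[0], b, c)] + _suffix_grams(ws[1:])
-- ===== Notes on version B (the rewrite author's own statement) =====
-- stated objective: simpler
-- what changed: Replaces A's zip-of-three-shifted-copies plus two explicitly constructed tail grams and the nonempty guard by a structural recursion over the suffixes of the word list, emitting one trigram per non-empty suffix with missing positions defaulting to the sentinel word (no sentinel appending, no slicing).
import Mathlib
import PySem

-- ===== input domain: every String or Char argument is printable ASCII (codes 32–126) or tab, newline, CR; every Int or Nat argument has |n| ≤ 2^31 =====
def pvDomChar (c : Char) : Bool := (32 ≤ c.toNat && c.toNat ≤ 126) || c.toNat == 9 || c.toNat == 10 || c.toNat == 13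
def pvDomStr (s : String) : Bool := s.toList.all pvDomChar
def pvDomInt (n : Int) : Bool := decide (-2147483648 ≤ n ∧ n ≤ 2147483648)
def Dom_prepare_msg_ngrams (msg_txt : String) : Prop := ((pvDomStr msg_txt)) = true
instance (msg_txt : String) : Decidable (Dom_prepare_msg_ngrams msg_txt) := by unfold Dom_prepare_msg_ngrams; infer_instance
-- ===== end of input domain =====

-- B replaces A's zip-of-shifted-copies plus two hand-built tail grams by a structural
-- recursion over suffixes of the word list, with missing positions defaulting to 'PAD'
-- (objective: simpler).


-- ===== PORT A =====
def prepare_msg_ngrams (msg_txt : String) : List (String × String × String) :=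
  let t := PySem.Str.replace msg_txt "." " "
  let ws0 := (PySem.Str.split? t " ").getD []            -- sep = " " ≠ "", so split? is some
  let ws1 := ws0.filter (fun w => decide (w ≠ "") && decide (w ≠ " ") && decide (2 ≤ PySem.Str.len w))
  let ws := if ws1.length < 3 then ws1 ++ ["PAD"] else ws1
  -- zip(*[msg_words[i:] for i in range(3)]) with range(3) unrolled
  let g0 := PySem.List.slice ws (some (0 : Int)) none
  let g1 := PySem.List.slice ws (some (1 : Int)) none
  let g2 := PySem.List.slice ws (some (2 : Int)) none
  let ngrams := g0.zip (g1.zip g2)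
  if 0 < ngrams.length then
    match PySem.List.pyGet? ngrams (-1) with              -- ngrams[-1]; guarded nonempty, so some
    | some last_gram => ngrams ++ [(last_gram.2.1, last_gram.2.2, "PAD"), (last_gram.2.2, "PAD", "PAD")]
    | none => ngrams
  else ngrams

-- ===== PORT B =====
-- one trigram per non-empty suffix: missing positions default to 'PAD'
def pvSuffixGrams : List String → List (String × String × String)
  | [] => []
  | a :: t =>
      let b := match t with | [] => "PAD" | x :: _ => x          -- ws[1] if len(ws) > 1 else 'PAD'
      let c := match t with | _ :: y :: _ => y | _ => "PAD"      -- ws[2] if len(ws) > 2 else 'PAD'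
      (a, b, c) :: pvSuffixGrams t

def prepare_msg_ngrams_alt (msg_txt : String) : List (String × String × String) :=
  let ws0 := (PySem.Str.split? (PySem.Str.replace msg_txt "." " ") " ").getD []
  let words := ws0.filter (fun w => decide (2 ≤ PySem.Str.len w))
  let words := if words.length < 3 then words ++ ["PAD"] else words
  if words.length < 3 then []
  else pvSuffixGrams words

-- ===== PRECONDITION & SPEC =====
def Spec_prepare_msg_ngrams (msg_txt : String) (out : List (String × String × String)) : Prop := out = prepare_msg_ngrams_alt msg_txt
instance (msg_txt : String) (out : List (String × String × String)) : Decidable (Spec_prepare_msg_ngrams msg_txt out) := by unfold Spec_prepare_msg_ngrams; infer_instance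

-- ===== CLAIM (what is proved, stated in full; the proofs are below) =====
def Claim_equal_prepare_msg_ngrams : Prop := ∀ (msg_txt : String), Dom_prepare_msg_ngrams msg_txt → Spec_prepare_msg_ngrams msg_txt (prepare_msg_ngrams msg_txt)

-- ===== LEMMAS AND PROOFS =====

-- the 3-gram shape of A's zip
def pvTri : List String → List (String × String × String)
  | a :: b :: c :: t => (a, b, c) :: pvTri (b :: c :: t)
  | _ => []

lemma pvFilter_eq (w : String) :
    (decide (w ≠ "") && decide (w ≠ " ") && decide (2 ≤ PySem.Str.len w)) = decide (2 ≤ PySem.Str.len w) := by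
  by_cases h : 2 ≤ PySem.Str.len w
  · have h1 : w ≠ "" := by rintro rfl; exact absurd h (by decide)
    have h2 : w ≠ " " := by rintro rfl; exact absurd h (by decide)
    rw [decide_eq_true h1, decide_eq_true h2, decide_eq_true h]
    rfl
  · have hf : decide (2 ≤ PySem.Str.len w) = false := decide_eq_false h
    rw [hf, Bool.and_false]

lemma pvZip_eq_tri : ∀ ws : List String, ws.zip ((ws.drop 1).zip (ws.drop 2)) = pvTri ws
  | [] => rfl
  | [_] => rfl
  | [_, _] => rfl
  | a :: b :: c :: t => by
      simpa [pvTri] using pvZip_eq_tri (b :: c :: t)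

lemma pvTri_nil_of_short (ws : List String) (h : ws.length < 3) : pvTri ws = [] := by
  match ws with
  | [] => rfl
  | [_] => rfl
  | [_, _] => rfl
  | _ :: _ :: _ :: _ => exact absurd h (by simp)

lemma pvTri_pads : ∀ (t : List String) (a b c : String),
    pvTri ((a :: b :: c :: t) ++ ["PAD", "PAD"]) =
      pvTri (a :: b :: c :: t) ++
        ((pvTri (a :: b :: c :: t)).getLast?.map
          (fun l => [(l.2.1, l.2.2, "PAD"), (l.2.2, "PAD", "PAD")])).getD []
  | [], a, b, c => by simp [pvTri]
  | d :: u, a, b, c => by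
      have ih := pvTri_pads u b c d
      have h1 : ((a :: b :: c :: d :: u) ++ ["PAD", "PAD"])
          = a :: ((b :: c :: d :: u) ++ ["PAD", "PAD"]) := rfl
      have h2 : pvTri (a :: ((b :: c :: d :: u) ++ ["PAD", "PAD"]))
          = (a, b, c) :: pvTri ((b :: c :: d :: u) ++ ["PAD", "PAD"]) := rfl
      have h3 : pvTri (a :: b :: c :: d :: u) = (a, b, c) :: pvTri (b :: c :: d :: u) := rfl
      have h4 : pvTri (b :: c :: d :: u) = (b, c, d) :: pvTri (c :: d :: u) := rfl
      rw [h1, h2, ih, h3]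
      have h5 : ((a, b, c) :: pvTri (b :: c :: d :: u)).getLast?
          = (pvTri (b :: c :: d :: u)).getLast? := by
        rw [h4]; exact List.getLast?_cons_cons
      rw [h5]
      simp

-- B's suffix recursion equals pvTri of the padded list
lemma pvGrams_eq : ∀ ws : List String, pvSuffixGrams ws = pvTri (ws ++ ["PAD", "PAD"])
  | [] => rfl
  | [_] => rfl
  | [_, _] => rfl
  | a :: b :: c :: t => by
      have ih := pvGrams_eq (b :: c :: t)
      simpa [pvSuffixGrams, pvTri] using ih

-- core equality, parametric in the (possibly padded) word list
lemma pvCore (ws : List String) :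
    (let g0 := PySem.List.slice ws (some (0 : Int)) none
     let g1 := PySem.List.slice ws (some (1 : Int)) none
     let g2 := PySem.List.slice ws (some (2 : Int)) none
     let ngrams := g0.zip (g1.zip g2)
     if 0 < ngrams.length then
       match PySem.List.pyGet? ngrams (-1) with
       | some last_gram => ngrams ++ [(last_gram.2.1, last_gram.2.2, "PAD"), (last_gram.2.2, "PAD", "PAD")]
       | none => ngrams
     else ngrams) =
    (if ws.length < 3 then [] else pvSuffixGrams ws) := by
  have hg0 : PySem.List.slice ws (some (0 : Int)) none = ws := by
    simp [PySem.List.slice_zero_start, PySem.List.slice_none_none]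
  have hg1 : PySem.List.slice ws (some (1 : Int)) none = ws.drop 1 := by
    simpa using PySem.List.slice_from_one ws
  have hg2 : PySem.List.slice ws (some (2 : Int)) none = ws.drop 2 := by
    have := PySem.List.slice_from (xs := ws) (a := 2) (by norm_num)
    simpa using this
  simp only [hg0, hg1, hg2, pvZip_eq_tri]
  by_cases hlen : ws.length < 3
  · rw [pvTri_nil_of_short ws hlen]
    simp [hlen]
  · rw [if_neg hlen]
    obtain ⟨a, b, c, t, rfl⟩ : ∃ a b c t, ws = a :: b :: c :: t := by
      rcases ws with _ | ⟨a, _ | ⟨b, _ | ⟨c, t⟩⟩⟩ <;> simp at hlen ⊢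
    · have hne : pvTri (a :: b :: c :: t) ≠ [] := by simp [pvTri]
      have hpos : 0 < (pvTri (a :: b :: c :: t)).length := List.length_pos_iff.mpr hne
      rw [if_pos hpos, PySem.List.pyGet?_neg_one, pvGrams_eq (a :: b :: c :: t), pvTri_pads t a b c]
      obtain ⟨l, hl⟩ := Option.isSome_iff_exists.mp (List.getLast?_isSome.mpr hne)
      rw [hl]
      simp

-- ===== VERDICT (by name: the statement is the Claim_ definition above) =====
set_option maxHeartbeats 1000000 in
theorem prepare_msg_ngrams_spec : Claim_equal_prepare_msg_ngrams := by
  intro s _hd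
  unfold Spec_prepare_msg_ngrams prepare_msg_ngrams prepare_msg_ngrams_alt
  simp only [pvFilter_eq]
  generalize List.filter (fun w => decide (2 ≤ PySem.Str.len w)) ((PySem.Str.split? (PySem.Str.replace s "." " ") " ").getD []) = l
  generalize (if l.length < 3 then l ++ ["PAD"] else l) = ws
  exact pvCore ws
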